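-- pv_equiv track=rewrite | github.com/paulklemstine/factor | research_field_11_adelic.py | adelic_correlation
-- ===== SOURCE A (Python) =====
-- def adelic_correlation(N, p_factor, q_factor, small_primes):
--     """Test: do p-adic expansions at small primes correlate with factor structure?
--     Specifically: does the pattern of N mod small_prime predict anything about
--     the large factors p and q?
--     """
--     # For each small prime r, N mod r = (p*q) mod r = (p mod r)*(q mod r) mod r
--     # This gives us a system of equations: x*y = N mod r for each r
--     # This is the CRT approach - it's equivalent to solving a system of
--     # quadratic congruences
--
--     residues = [(r, N % r) for r in small_primes]
--
--     # For each small prime r, count solutions to x*y = N mod r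
--     solutions_per_prime = {}
--     for r, nr in residues:
--         sols = []
--         for x in range(r):
--             for y in range(r):
--                 if (x * y) % r == nr:
--                     sols.append((x, y))
--         solutions_per_prime[r] = sols
--
--         # Check if actual factors are among solutions
--         actual = (p_factor % r, q_factor % r)
--         is_present = actual in sols or (actual[1], actual[0]) in sols
--         # This is always true by construction
--
--     # CRT reconstruction: try to combine solutions across primes
--     # This is essentially the index calculus / sieve approach
--     # Number of combinations = prod(len(sols)) ~ prod(r) = exp(sum(log r))
--     total_combinations = 1
--     for r in small_primes:
--         total_combinations *= len(solutions_per_prime[r])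
--
--     return solutions_per_prime, total_combinations
-- ===== SOURCE B (Python) =====
-- def _egcd(a, b):
--     # extended Euclid: returns (g, u, v) with u*a + v*b == g == gcd(a, b) (for a, b >= 0)
--     if b == 0:
--         return (a, 1, 0)
--     g, u, v = _egcd(b, a % b)
--     return (g, v, u - (a // b) * v)
--
--
-- def adelic_correlation(N, p_factor, q_factor, small_primes):
--     """For each modulus r list the solutions of x*y == N (mod r) directly:
--     for each x the solutions y form an arithmetic progression computed with a
--     modular inverse, so each modulus costs O(r) egcd calls instead of O(r^2)."""
--     solutions_per_prime = {}
--     for r in small_primes: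
--         nr = N % r
--         sols = []
--         for x in range(r):
--             g, u, _ = _egcd(x, r)          # g = gcd(x, r); for x == 0 this is r
--             if nr % g == 0:
--                 c = r // g
--                 y0 = ((u % c) * (nr // g)) % c
--                 for k in range(g):
--                     sols.append((x, y0 + k * c))
--         solutions_per_prime[r] = sols
--     total_combinations = 1
--     for r in small_primes:
--         total_combinations *= len(solutions_per_prime[r])
--     return solutions_per_prime, total_combinations
-- ===== Notes on version B (the rewrite author's own statement) =====
-- stated objective: faster
-- what changed: For each modulus r, B replaces A's O(r^2) double loop over all (x,y) pairs by computing, for each x, the solution set of x*y = N mod r directly as an arithmetic progression from a modular inverse obtained with extended Euclid (x=0 falls out of the same formula), preserving A's output order.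
import Mathlib
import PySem

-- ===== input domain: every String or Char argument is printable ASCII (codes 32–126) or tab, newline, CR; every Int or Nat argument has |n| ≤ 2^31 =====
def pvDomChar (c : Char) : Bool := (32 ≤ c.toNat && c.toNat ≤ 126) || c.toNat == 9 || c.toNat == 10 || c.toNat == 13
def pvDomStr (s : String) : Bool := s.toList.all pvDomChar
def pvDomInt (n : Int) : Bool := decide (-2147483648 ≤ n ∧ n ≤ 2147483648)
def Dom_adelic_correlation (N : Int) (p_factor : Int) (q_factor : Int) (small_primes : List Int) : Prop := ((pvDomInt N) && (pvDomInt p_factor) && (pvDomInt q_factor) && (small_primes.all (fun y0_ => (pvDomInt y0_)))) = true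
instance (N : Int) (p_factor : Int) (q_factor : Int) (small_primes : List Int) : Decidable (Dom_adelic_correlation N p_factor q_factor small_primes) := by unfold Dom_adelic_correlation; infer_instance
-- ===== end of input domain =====

-- B replaces A's inner O(r) scan per x by a modular-inverse formula (extended Euclid),
-- so each modulus r costs O(r) egcd calls instead of O(r^2) trial pairs; same return value.

-- ===== PORT A =====
def adelic_correlation (N : Int) (p_factor : Int) (q_factor : Int) (small_primes : List Int) : (List (Int × List (Int × Int))) × Int :=
  -- residues = [(r, N % r) for r in small_primes]
  let residues := small_primes.map (fun r => (r, PySem.Int.mod N r))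
  -- for r, nr in residues: nested x/y loops appending solutions
  let spp := residues.foldl (fun (d : PySem.Dict Int (List (Int × Int))) rp =>
    let r := rp.1
    let nr := rp.2
    let sols := (PySem.List.pyRange 0 r 1).foldl (fun acc x =>
      (PySem.List.pyRange 0 r 1).foldl (fun acc y =>
        if PySem.Int.mod (x * y) r == nr then acc ++ [(x, y)] else acc) acc) []
    -- 'actual' / 'is_present' of A, computed and never used (pure, as in the Python)
    let actual := (PySem.Int.mod p_factor r, PySem.Int.mod q_factor r)
    let _is_present := sols.contains actual || sols.contains (actual.2, actual.1)
    d.insert r sols) PySem.Dict.empty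
  -- total_combinations loop; solutions_per_prime[r] always present, so getD [] is exact
  let total := small_primes.foldl (fun t r => t * ((spp.getD r []).length : Int)) 1
  (spp.items, total)

-- ===== PORT B =====
-- helper: _egcd(a, b) of Source B; the recursion decreases |b| (pvEgcd_dec below)
theorem pvEgcd_dec (a b : Int) (h : ¬ b = 0) : (PySem.Int.mod a b).natAbs < b.natAbs := by
  rcases lt_or_gt_of_ne h with hb | hb
  · have h1 := PySem.Int.mod_neg_bounds a hb
    omega
  · have h1 := PySem.Int.mod_nonneg a hb
    have h2 := PySem.Int.mod_lt a hb
    omega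

def pvEgcd (a b : Int) : Int × Int × Int :=
  if b = 0 then (a, 1, 0)
  else
    let t := pvEgcd b (PySem.Int.mod a b)
    (t.1, t.2.2, t.2.1 - PySem.Int.floordiv a b * t.2.2)
termination_by b.natAbs
decreasing_by exact pvEgcd_dec a b (by assumption)

def adelic_correlation_alt (N : Int) (p_factor : Int) (q_factor : Int) (small_primes : List Int) : (List (Int × List (Int × Int))) × Int :=
  let spp := small_primes.foldl (fun (d : PySem.Dict Int (List (Int × Int))) r =>
    let nr := PySem.Int.mod N r
    let sols := (PySem.List.pyRange 0 r 1).foldl (fun acc x =>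
      let t := pvEgcd x r
      let g := t.1
      let u := t.2.1
      if PySem.Int.mod nr g == 0 then
        let c := PySem.Int.floordiv r g
        let y0 := PySem.Int.mod (PySem.Int.mod u c * PySem.Int.floordiv nr g) c
        (PySem.List.pyRange 0 g 1).foldl (fun acc2 k => acc2 ++ [(x, y0 + k * c)]) acc
      else acc) []
    d.insert r sols) PySem.Dict.empty
  let total := small_primes.foldl (fun t r => t * ((spp.getD r []).length : Int)) 1
  (spp.items, total)

-- ===== PRECONDITION & SPEC =====
-- Pre_ excludes inputs containing the modulus 0, on which A (and B) raise ZeroDivisionError.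
def Pre_adelic_correlation (N : Int) (p_factor : Int) (q_factor : Int) (small_primes : List Int) : Prop := (0 : Int) ∉ small_primes
instance (N : Int) (p_factor : Int) (q_factor : Int) (small_primes : List Int) : Decidable (Pre_adelic_correlation N p_factor q_factor small_primes) := by unfold Pre_adelic_correlation; infer_instance

def pvWitness_adelic_correlation : Int × Int × Int × List Int := (6, 2, 3, [5, 7])

def Spec_adelic_correlation (N : Int) (p_factor : Int) (q_factor : Int) (small_primes : List Int) (out : (List (Int × List (Int × Int))) × Int) : Prop := out = adelic_correlation_alt N p_factor q_factor small_primes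
instance (N : Int) (p_factor : Int) (q_factor : Int) (small_primes : List Int) (out : (List (Int × List (Int × Int))) × Int) : Decidable (Spec_adelic_correlation N p_factor q_factor small_primes out) := by unfold Spec_adelic_correlation; infer_instance

-- ===== CLAIM (what is proved, stated in full; the proofs are below) =====
def Claim_equal_adelic_correlation : Prop := ∀ (N : Int) (p_factor : Int) (q_factor : Int) (small_primes : List Int), Dom_adelic_correlation N p_factor q_factor small_primes → Pre_adelic_correlation N p_factor q_factor small_primes → Spec_adelic_correlation N p_factor q_factor small_primes (adelic_correlation N p_factor q_factor small_primes)

-- ===== LEMMAS AND PROOFS =====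

-- extended-Euclid correctness: first component is gcd, Bézout identity for the coefficients
theorem pv_gcd_step (a b : Int) (hb : b ≠ 0) : Int.gcd b (a % b) = Int.gcd a b := by
  apply Nat.dvd_antisymm
  · apply Int.dvd_gcd
    · have h1 : (Int.gcd b (a % b) : Int) ∣ b := Int.gcd_dvd_left b (a % b)
      have h2 : (Int.gcd b (a % b) : Int) ∣ a % b := Int.gcd_dvd_right b (a % b)
      have h3 := Dvd.dvd.add (h1.mul_right (a / b)) h2
      have e : b * (a / b) + a % b = a := by rw [Int.emod_def]; ring
      rwa [e] at h3
    · exact Int.gcd_dvd_left b (a % b)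
  · apply Int.dvd_gcd
    · exact Int.gcd_dvd_right a b
    · have h1 : (Int.gcd a b : Int) ∣ a := Int.gcd_dvd_left a b
      have h2 : (Int.gcd a b : Int) ∣ b := Int.gcd_dvd_right a b
      rw [Int.emod_def]
      exact dvd_sub h1 (Dvd.dvd.mul_right h2 _)

theorem pvEgcd_spec (a b : Int) : 0 ≤ a → 0 ≤ b →
    (pvEgcd a b).1 = (Int.gcd a b : Int) ∧
    (pvEgcd a b).2.1 * a + (pvEgcd a b).2.2 * b = (Int.gcd a b : Int) := by
  induction a, b using pvEgcd.induct with
  | case1 a =>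
    intro ha _
    rw [pvEgcd]
    simp [Int.gcd, Int.natAbs_of_nonneg ha]
  | case2 a b hbz ih =>
    intro ha hb
    have hbpos : 0 < b := lt_of_le_of_ne hb (Ne.symm hbz)
    have hm0 : 0 ≤ PySem.Int.mod a b := PySem.Int.mod_nonneg a hbpos
    obtain ⟨ih1, ih2⟩ := ih hb hm0
    rw [pvEgcd]
    simp only [hbz, if_false]
    constructor
    · rw [ih1, PySem.Int.mod_eq_emod_of_pos hbpos, pv_gcd_step a b hbz]
    · have hg : ((Int.gcd b (PySem.Int.mod a b) : Int)) = ((Int.gcd a b : Int)) := by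
        rw [PySem.Int.mod_eq_emod_of_pos hbpos, pv_gcd_step a b hbz]
      rw [PySem.Int.floordiv_eq_ediv_of_pos hbpos]
      linear_combination ih2 + hg - (pvEgcd b (PySem.Int.mod a b)).2.2 * (PySem.Int.mod_eq_emod_of_pos (a := a) hbpos) - (pvEgcd b (PySem.Int.mod a b)).2.2 * (Int.emod_def a b)


-- arithmetic core: solutions of (g x') z = g n' (mod g c) are an arithmetic progression
theorem pv_char (g c x' n' u v y0 : Int)
    (hgpos : 0 < g) (hcpos : 0 < c)
    (hnr0 : 0 ≤ g * n') (hnrr : g * n' < g * c)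
    (hbez : u * (g * x') + v * (g * c) = g)
    (hy0 : y0 = (u % c * n') % c)
    (z : Int) :
    (0 ≤ z ∧ z < g * c ∧ (g * x' * z) % (g * c) = g * n') ↔
    (∃ k, 0 ≤ k ∧ k < g ∧ z = y0 + k * c) := by
  have hgne : g ≠ 0 := ne_of_gt hgpos
  have hbez' : u * x' + v * c = 1 := mul_left_cancel₀ hgne (by linear_combination hbez)
  have hy0u : y0 = (u * n') % c := by
    rw [hy0]
    conv_lhs => rw [Int.mul_emod, Int.emod_emod_of_dvd u (dvd_refl c)]
    rw [← Int.mul_emod]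
  have hy00 : 0 ≤ y0 := hy0u ▸ Int.emod_nonneg _ (ne_of_gt hcpos)
  have hy0c : y0 < c := hy0u ▸ Int.emod_lt_of_pos _ hcpos
  constructor
  · rintro ⟨hz0, hzr, hmod⟩
    set q := (g * x' * z) / (g * c) with hq
    have hed := Int.emod_def (g * x' * z) (g * c)
    have hcd : x' * z - n' = c * q := mul_left_cancel₀ hgne (by linear_combination hmod - hed)
    have hzc : z % c = y0 := by
      have hdv : c ∣ z - u * n' := ⟨u * q + v * z, by linear_combination u * hcd - z * hbez'⟩
      have h1 : (z - u * n') % c = 0 := Int.emod_eq_zero_of_dvd hdv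
      rw [hy0u, Int.emod_eq_emod_iff_emod_sub_eq_zero]
      exact h1
    refine ⟨z / c, Int.ediv_nonneg hz0 (le_of_lt hcpos), ?_, ?_⟩
    · rw [Int.ediv_lt_iff_lt_mul hcpos]; linarith [hzr]
    · linear_combination hzc - Int.emod_def z c
  · rintro ⟨k, hk0, hkg, rfl⟩
    have hkc : k * c ≤ (g - 1) * c := mul_le_mul_of_nonneg_right (by omega) (le_of_lt hcpos)
    refine ⟨by positivity, by nlinarith, ?_⟩
    have het := Int.emod_def (u * n') c
    have hxy0 : x' * y0 - n' = c * (-(n' * v) - x' * ((u * n') / c)) := by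
      linear_combination x' * hy0u + x' * het + n' * hbez'
    have hw : g * x' * (y0 + k * c) = g * n' + (g * c) * ((-(n' * v) - x' * ((u * n') / c)) + x' * k) := by
      linear_combination g * hxy0
    rw [hw, Int.add_mul_emod_self_left, Int.emod_eq_of_lt hnr0 hnrr]

-- the filter of A's inner loop equals B's arithmetic progression (or is empty)
theorem pv_filter_eq (r x nr : Int) (hr : 0 < r) (hx : 0 ≤ x) (hxr : x < r)
    (hnr0 : 0 ≤ nr) (hnrr : nr < r) :
    ((PySem.List.pyRange 0 r 1).filter (fun y => PySem.Int.mod (x * y) r == nr)) =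
    (if PySem.Int.mod nr (pvEgcd x r).1 == 0 then
      (PySem.List.pyRange 0 (pvEgcd x r).1 1).map (fun k =>
        PySem.Int.mod (PySem.Int.mod (pvEgcd x r).2.1 (PySem.Int.floordiv r (pvEgcd x r).1) *
          PySem.Int.floordiv nr (pvEgcd x r).1) (PySem.Int.floordiv r (pvEgcd x r).1) + k * PySem.Int.floordiv r (pvEgcd x r).1)
     else []) := by
  obtain ⟨hg1, hg2⟩ := pvEgcd_spec x r hx (le_of_lt hr)
  set g := (pvEgcd x r).1 with hgdef
  set u := (pvEgcd x r).2.1 with hudef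
  set v := (pvEgcd x r).2.2 with hvdef
  have hgx : g ∣ x := by rw [hg1]; exact Int.gcd_dvd_left x r
  have hgr : g ∣ r := by rw [hg1]; exact Int.gcd_dvd_right x r
  have hgpos : 0 < g := by
    rw [hg1]
    have hne : Int.gcd x r ≠ 0 := by
      intro h
      rw [Int.gcd_eq_zero_iff] at h
      omega
    exact_mod_cast Nat.pos_of_ne_zero hne
  have hgne : g ≠ 0 := ne_of_gt hgpos
  obtain ⟨c, hc⟩ := hgr
  have hcpos : 0 < c := by nlinarith
  have hfd : PySem.Int.floordiv r g = c := by
    rw [PySem.Int.floordiv_eq_ediv_of_pos hgpos]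
    nth_rewrite 1 [hc]
    exact Int.mul_ediv_cancel_left c hgne
  by_cases hdvd : g ∣ nr
  · rw [if_pos (by rw [beq_iff_eq, PySem.Int.mod_eq_zero_iff_dvd]; exact hdvd)]
    obtain ⟨x', hx'⟩ := (by exact hgx : g ∣ x)
    obtain ⟨n', hn'⟩ := (by exact hdvd : g ∣ nr)
    have hbez0 : u * (g * x') + v * (g * c) = g := by
      rw [← hx', ← hc]
      exact hg2.trans hg1.symm
    have hy0eq : PySem.Int.mod (PySem.Int.mod u c * PySem.Int.floordiv nr g) c =
        (u % c * n') % c := by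
      rw [PySem.Int.mod_eq_emod_of_pos hcpos, PySem.Int.mod_eq_emod_of_pos hcpos,
        PySem.Int.floordiv_eq_ediv_of_pos hgpos, hn', Int.mul_ediv_cancel_left n' hgne]
    have hchar := pv_char g c x' n' u v ((u % c * n') % c) hgpos hcpos
      (by rw [← hn']; exact hnr0) (by rw [← hn', ← hc]; exact hnrr) hbez0 rfl
    have hmem : ∀ z : Int,
        (z ∈ (PySem.List.pyRange 0 r 1).filter (fun y => PySem.Int.mod (x * y) r == nr) ↔
         z ∈ (PySem.List.pyRange 0 g 1).map (fun k => (u % c * n') % c + k * c)) := by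
      intro z
      simp only [List.mem_filter, List.mem_map, PySem.List.mem_pyRange_one, beq_iff_eq]
      constructor
      · rintro ⟨⟨hz0, hzr⟩, hmod⟩
        rw [PySem.Int.mod_eq_emod_of_pos hr] at hmod
        obtain ⟨k, hk0, hkg, hzk⟩ := (hchar z).mp ⟨hz0, by rw [← hc]; exact hzr,
          by rw [← hx', ← hc, ← hn']; exact hmod⟩
        exact ⟨k, ⟨hk0, hkg⟩, hzk.symm⟩
      · rintro ⟨k, ⟨hk0, hkg⟩, hzk⟩
        obtain ⟨a1, a2, a3⟩ := (hchar z).mpr ⟨k, hk0, hkg, hzk.symm⟩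
        refine ⟨⟨a1, by rw [hc]; exact a2⟩, ?_⟩
        rw [PySem.Int.mod_eq_emod_of_pos hr, hx', hc, hn']
        exact a3
    have hndL : ((PySem.List.pyRange 0 r 1).filter (fun y => PySem.Int.mod (x * y) r == nr)).Nodup :=
      (PySem.List.nodup_pyRange_one 0 r).filter _
    have hsortL : ((PySem.List.pyRange 0 r 1).filter (fun y => PySem.Int.mod (x * y) r == nr)).Pairwise (· ≤ ·) :=
      ((PySem.List.pairwise_lt_pyRange_one 0 r).filter _).imp le_of_lt
    have hndR : ((PySem.List.pyRange 0 g 1).map (fun k => (u % c * n') % c + k * c)).Nodup := by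
      refine (PySem.List.nodup_pyRange_one 0 g).map_on ?_
      intro a _ b _ hab
      simp only at hab
      have : a * c = b * c := by omega
      exact mul_right_cancel₀ (ne_of_gt hcpos) this
    have hsortR : ((PySem.List.pyRange 0 g 1).map (fun k => (u % c * n') % c + k * c)).Pairwise (· ≤ ·) := by
      rw [List.pairwise_map]
      exact (PySem.List.pairwise_lt_pyRange_one 0 g).imp (fun h => by nlinarith)
    have hperm := (List.perm_ext_iff_of_nodup hndL hndR).mpr hmem
    have heq := hperm.eq_of_pairwise (fun a b _ _ h1 h2 => le_antisymm h1 h2) hsortL hsortR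
    rw [heq]
    apply List.map_congr_left
    intro k _
    rw [hfd, hy0eq]
  · rw [if_neg (by rw [beq_iff_eq, PySem.Int.mod_eq_zero_iff_dvd]; exact hdvd)]
    refine List.filter_eq_nil_iff.mpr ?_
    intro y _ hp
    apply hdvd
    rw [beq_iff_eq] at hp
    rw [PySem.Int.mod_eq_emod_of_pos hr] at hp
    have he := Int.emod_def (x * y) r
    obtain ⟨x', hx'⟩ := (by exact hgx : g ∣ x)
    obtain ⟨r', hr'⟩ := (by exact ⟨c, hc⟩ : g ∣ r)
    exact ⟨x' * y - r' * (x * y / r), by rw [← hp, he]; nth_rewrite 1 [hx']; nth_rewrite 1 [hr']; ring⟩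

-- per-modulus solution lists of the two ports agree
theorem pv_sols_eq (N r : Int) (hrne : r ≠ 0) :
    ((PySem.List.pyRange 0 r 1).foldl (fun acc x =>
      (PySem.List.pyRange 0 r 1).foldl (fun acc y =>
        if PySem.Int.mod (x * y) r == PySem.Int.mod N r then acc ++ [(x, y)] else acc) acc) ([] : List (Int × Int))) =
    ((PySem.List.pyRange 0 r 1).foldl (fun acc x =>
      let t := pvEgcd x r
      let g := t.1
      let u := t.2.1
      if PySem.Int.mod (PySem.Int.mod N r) g == 0 then
        let c := PySem.Int.floordiv r g
        let y0 := PySem.Int.mod (PySem.Int.mod u c * PySem.Int.floordiv (PySem.Int.mod N r) g) c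
        (PySem.List.pyRange 0 g 1).foldl (fun acc2 k => acc2 ++ [(x, y0 + k * c)]) acc
      else acc) ([] : List (Int × Int))) := by
  rcases lt_or_gt_of_ne hrne with hr | hr
  · rw [PySem.List.pyRange_one_eq_nil (by omega)]
    rfl
  · have hnr0 : 0 ≤ PySem.Int.mod N r := PySem.Int.mod_nonneg N hr
    have hnrr : PySem.Int.mod N r < r := PySem.Int.mod_lt N hr
    have hL : ((PySem.List.pyRange 0 r 1).foldl (fun acc x =>
        (PySem.List.pyRange 0 r 1).foldl (fun acc y =>
          if PySem.Int.mod (x * y) r == PySem.Int.mod N r then acc ++ [(x, y)] else acc) acc) ([] : List (Int × Int))) =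
        (PySem.List.pyRange 0 r 1).flatMap (fun x =>
          ((PySem.List.pyRange 0 r 1).filter (fun y => PySem.Int.mod (x * y) r == PySem.Int.mod N r)).map (fun y => (x, y))) := by
      have h1 : ∀ (acc : List (Int × Int)) (x : Int), x ∈ PySem.List.pyRange 0 r 1 →
          ((PySem.List.pyRange 0 r 1).foldl (fun acc y =>
            if PySem.Int.mod (x * y) r == PySem.Int.mod N r then acc ++ [(x, y)] else acc) acc) =
          acc ++ ((PySem.List.pyRange 0 r 1).filter (fun y => PySem.Int.mod (x * y) r == PySem.Int.mod N r)).map (fun y => (x, y)) := by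
        intro acc x _
        exact PySem.List.foldl_append_if _ _ _ _
      refine (PySem.List.foldl_congr_mem _ _ _ _ h1).trans ?_
      rw [PySem.List.foldl_append_eq_flatMap]
      simp
    have hR : ((PySem.List.pyRange 0 r 1).foldl (fun acc x =>
        let t := pvEgcd x r
        let g := t.1
        let u := t.2.1
        if PySem.Int.mod (PySem.Int.mod N r) g == 0 then
          let c := PySem.Int.floordiv r g
          let y0 := PySem.Int.mod (PySem.Int.mod u c * PySem.Int.floordiv (PySem.Int.mod N r) g) c
          (PySem.List.pyRange 0 g 1).foldl (fun acc2 k => acc2 ++ [(x, y0 + k * c)]) acc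
        else acc) ([] : List (Int × Int))) =
        (PySem.List.pyRange 0 r 1).flatMap (fun x =>
          if PySem.Int.mod (PySem.Int.mod N r) (pvEgcd x r).1 == 0 then
            (PySem.List.pyRange 0 (pvEgcd x r).1 1).map (fun k =>
              (x, PySem.Int.mod (PySem.Int.mod (pvEgcd x r).2.1 (PySem.Int.floordiv r (pvEgcd x r).1) *
                PySem.Int.floordiv (PySem.Int.mod N r) (pvEgcd x r).1) (PySem.Int.floordiv r (pvEgcd x r).1) +
                k * PySem.Int.floordiv r (pvEgcd x r).1))
          else []) := by
      have h1 : ∀ (acc : List (Int × Int)) (x : Int), x ∈ PySem.List.pyRange 0 r 1 →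
          (let t := pvEgcd x r
           let g := t.1
           let u := t.2.1
           if PySem.Int.mod (PySem.Int.mod N r) g == 0 then
             let c := PySem.Int.floordiv r g
             let y0 := PySem.Int.mod (PySem.Int.mod u c * PySem.Int.floordiv (PySem.Int.mod N r) g) c
             (PySem.List.pyRange 0 g 1).foldl (fun acc2 k => acc2 ++ [(x, y0 + k * c)]) acc
           else acc) =
          acc ++ (if PySem.Int.mod (PySem.Int.mod N r) (pvEgcd x r).1 == 0 then
            (PySem.List.pyRange 0 (pvEgcd x r).1 1).map (fun k =>
              (x, PySem.Int.mod (PySem.Int.mod (pvEgcd x r).2.1 (PySem.Int.floordiv r (pvEgcd x r).1) *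
                PySem.Int.floordiv (PySem.Int.mod N r) (pvEgcd x r).1) (PySem.Int.floordiv r (pvEgcd x r).1) +
                k * PySem.Int.floordiv r (pvEgcd x r).1))
          else []) := by
        intro acc x _
        simp only
        split
        · rw [PySem.List.foldl_append_singleton_eq_map]
        · rw [List.append_nil]
      refine (PySem.List.foldl_congr_mem _ _ _ _ h1).trans ?_
      rw [PySem.List.foldl_append_eq_flatMap]
      simp
    rw [hL, hR]
    rw [List.flatMap_def, List.flatMap_def]
    congr 1
    apply List.map_congr_left
    intro x hxmem
    rw [PySem.List.mem_pyRange_one] at hxmem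
    rw [pv_filter_eq r x (PySem.Int.mod N r) hr hxmem.1 hxmem.2 hnr0 hnrr]
    split
    · rw [List.map_map]
      rfl
    · simp

-- ===== VERDICT (by name: the statement is the Claim_ definition above) =====
theorem adelic_correlation_spec : Claim_equal_adelic_correlation := by
  intro N p q sp _hdom hpre
  unfold Spec_adelic_correlation adelic_correlation adelic_correlation_alt
  dsimp only
  rw [List.foldl_map]
  have hd : (sp.foldl (fun (d : PySem.Dict Int (List (Int × Int))) r =>
      let sols := (PySem.List.pyRange 0 r 1).foldl (fun acc x =>
        (PySem.List.pyRange 0 r 1).foldl (fun acc y =>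
          if PySem.Int.mod (x * y) r == PySem.Int.mod N r then acc ++ [(x, y)] else acc) acc) []
      d.insert r sols) PySem.Dict.empty) =
    (sp.foldl (fun (d : PySem.Dict Int (List (Int × Int))) r =>
      let nr := PySem.Int.mod N r
      let sols := (PySem.List.pyRange 0 r 1).foldl (fun acc x =>
        let t := pvEgcd x r
        let g := t.1
        let u := t.2.1
        if PySem.Int.mod nr g == 0 then
          let c := PySem.Int.floordiv r g
          let y0 := PySem.Int.mod (PySem.Int.mod u c * PySem.Int.floordiv nr g) c
          (PySem.List.pyRange 0 g 1).foldl (fun acc2 k => acc2 ++ [(x, y0 + k * c)]) acc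
        else acc) []
      d.insert r sols) PySem.Dict.empty) := by
    apply PySem.List.foldl_congr_mem
    intro d r hrmem
    have hrne : r ≠ 0 := fun h => hpre (h ▸ hrmem)
    simp only
    rw [pv_sols_eq N r hrne]
  simp only at hd ⊢
  rw [hd]
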